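-- pv_equiv track=rewrite | github.com/rgklab/ExOSITO | src/data_loader/datasets/labtest_order.py | has_five_unit_change_in_past_24_hours
-- ===== SOURCE A (Python) =====
-- def has_five_unit_change_in_past_24_hours(t, x, curr_time):
--     for i in range(len(t) - 1, 0, -1):  # Start from the most recent time
--         current_time = curr_time
--         past_24_hours_time = current_time - 24
--
--         # Get the index of the earliest time within the past 24 hours
--         j = i
--         while j >= 0 and t[j] > past_24_hours_time:
--             j -= 1
--
--         # Check if any value within the past 24 hours has changed by 5 or more units
--         for k in range(j + 1, i):
--             if abs(x[i] - x[k]) >= 5: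
--                 return True
--     return False
-- ===== SOURCE B (Python) =====
-- def has_five_unit_change_in_past_24_hours(t, x, curr_time):
--     # Single left-to-right pass: track the running min/max of the current
--     # contiguous run of entries with time > curr_time - 24; a spread of >= 5
--     # within a run means some pair differs by >= 5.
--     past = curr_time - 24
--     lo = hi = None
--     for ti, xi in zip(t, x):
--         if ti > past:
--             if lo is None:
--                 lo, hi = xi, xi
--             else:
--                 lo, hi = min(lo, xi), max(hi, xi)
--             if hi - lo >= 5:
--                 return True
--         else:
--             lo = hi = None
--     return False
-- ===== Notes on version B (the rewrite author's own statement) =====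
-- stated objective: alternative
-- what changed: Replaced the backward per-index window scan (while-loop window search plus inner pairwise comparison) by a single forward pass that keeps the running min/max of the current contiguous recent run and fires when the spread reaches 5.
import Mathlib
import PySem

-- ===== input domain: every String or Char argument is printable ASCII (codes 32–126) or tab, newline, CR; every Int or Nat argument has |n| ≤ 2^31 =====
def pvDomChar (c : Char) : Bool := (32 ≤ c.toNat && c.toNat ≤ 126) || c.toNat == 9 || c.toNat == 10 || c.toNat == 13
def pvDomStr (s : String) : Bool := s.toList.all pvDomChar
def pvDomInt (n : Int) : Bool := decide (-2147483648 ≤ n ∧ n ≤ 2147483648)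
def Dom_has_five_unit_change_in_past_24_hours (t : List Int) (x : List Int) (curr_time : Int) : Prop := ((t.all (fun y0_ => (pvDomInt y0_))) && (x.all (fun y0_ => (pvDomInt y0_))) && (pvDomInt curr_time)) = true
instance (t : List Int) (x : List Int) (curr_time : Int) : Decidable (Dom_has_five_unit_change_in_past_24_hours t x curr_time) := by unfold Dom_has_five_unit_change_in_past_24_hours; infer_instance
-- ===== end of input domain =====

-- B replaces A's backward per-index window rescans by one forward pass tracking the
-- running min/max of the current contiguous recent run (objective: alternative).

-- ===== PORT A =====
-- the inner `while j >= 0 and t[j] > past: j -= 1`, started at j = i;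
-- t-indices are always in range here, so `getD 0` is exact
def pvFindJ (t : List Int) (past : Int) : Nat → Int
  | 0 => if t.getD 0 0 > past then -1 else (0 : Int)
  | (j+1) => if t.getD (j+1) 0 > past then pvFindJ t past j else ((j : Int) + 1)

def has_five_unit_change_in_past_24_hours (t : List Int) (x : List Int) (curr_time : Int) : Bool :=
  (PySem.List.pyRange ((t.length : Int) - 1) 0 (-1)).any fun i =>
    let past := curr_time - 24
    let j := pvFindJ t past i.toNat  -- i ≥ 1 in this range, so i.toNat is exact
    (PySem.List.pyRange (j + 1) i 1).any fun k =>
      -- x[i], x[k]: in range on Pre_ (A raises IndexError exactly off Pre_)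
      decide (5 ≤ |x.getD i.toNat 0 - x.getD k.toNat 0|)

-- ===== PORT B =====
-- the for-loop of Source B over zip(t, x) with state (lo, hi) = None or the run's min/max
def pvRun (past : Int) : List (Int × Int) → Option (Int × Int) → Bool
  | [], _ => false
  | (ti, xi) :: rest, st =>
    if ti > past then
      let lo := match st with | none => xi | some (l, _) => min l xi
      let hi := match st with | none => xi | some (_, h) => max h xi
      if 5 ≤ hi - lo then true else pvRun past rest (some (lo, hi))
    else pvRun past rest none

def has_five_unit_change_in_past_24_hours_alt (t : List Int) (x : List Int) (curr_time : Int) : Bool :=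
  pvRun (curr_time - 24) (t.zip x) none

-- ===== PRECONDITION & SPEC =====
-- Pre_ excludes exactly the inputs where A raises IndexError: x shorter than t with
-- two consecutive recent timestamps at an index past the end of x.
def Pre_has_five_unit_change_in_past_24_hours (t : List Int) (x : List Int) (curr_time : Int) : Prop :=
  ∀ i : Nat, i < t.length → 1 ≤ i → x.length ≤ i →
    ¬(t.getD i 0 > curr_time - 24 ∧ t.getD (i - 1) 0 > curr_time - 24)
instance (t : List Int) (x : List Int) (curr_time : Int) : Decidable (Pre_has_five_unit_change_in_past_24_hours t x curr_time) := by unfold Pre_has_five_unit_change_in_past_24_hours; infer_instance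

def pvWitness_has_five_unit_change_in_past_24_hours : List Int × List Int × Int := ([0, 1], [0, 9], 0)

def Spec_has_five_unit_change_in_past_24_hours (t : List Int) (x : List Int) (curr_time : Int) (out : Bool) : Prop := out = has_five_unit_change_in_past_24_hours_alt t x curr_time
instance (t : List Int) (x : List Int) (curr_time : Int) (out : Bool) : Decidable (Spec_has_five_unit_change_in_past_24_hours t x curr_time out) := by unfold Spec_has_five_unit_change_in_past_24_hours; infer_instance

-- ===== CLAIM (what is proved, stated in full; the proofs are below) =====
def Claim_equal_has_five_unit_change_in_past_24_hours : Prop := ∀ (t : List Int) (x : List Int) (curr_time : Int), Dom_has_five_unit_change_in_past_24_hours t x curr_time → Pre_has_five_unit_change_in_past_24_hours t x curr_time → Spec_has_five_unit_change_in_past_24_hours t x curr_time (has_five_unit_change_in_past_24_hours t x curr_time)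


-- ===== LEMMAS AND PROOFS =====

-- the common characterisation: a pair k < i inside one contiguous recent run with |x i - x k| ≥ 5
def pvP (t x : List Int) (past : Int) : Prop :=
  ∃ i k : Nat, k < i ∧ i < t.length ∧ i < x.length ∧
    (∀ m : Nat, k ≤ m → m ≤ i → t.getD m 0 > past) ∧
    5 ≤ |x.getD i 0 - x.getD k 0|

theorem pvFindJ_le (t : List Int) (past : Int) (j : Nat) : pvFindJ t past j ≤ (j : Int) := by
  induction j with
  | zero => simp [pvFindJ]; split <;> omega
  | succ j ih => simp [pvFindJ]; split <;> omega

theorem pvFindJ_ge (t : List Int) (past : Int) (j : Nat) : -1 ≤ pvFindJ t past j := by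
  induction j with
  | zero => simp [pvFindJ]; split <;> omega
  | succ j ih => simp [pvFindJ]; split <;> omega

theorem pvFindJ_recent (t : List Int) (past : Int) (j : Nat) :
    ∀ m : Nat, pvFindJ t past j < (m : Int) → m ≤ j → t.getD m 0 > past := by
  induction j with
  | zero =>
    intro m h1 h2
    interval_cases m
    simp [pvFindJ] at h1
    split at h1
    · assumption
    · omega
  | succ j ih =>
    intro m h1 h2
    simp [pvFindJ] at h1
    split at h1
    · rcases Nat.lt_or_ge m (j+1) with h | h
      · exact ih m h1 (by omega)
      · have : m = j + 1 := by omega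
        subst this; assumption
    · omega

theorem pvFindJ_stop (t : List Int) (past : Int) (j : Nat) (h : 0 ≤ pvFindJ t past j) :
    t.getD (pvFindJ t past j).toNat 0 ≤ past := by
  induction j with
  | zero =>
    by_cases hc : t.getD 0 0 > past
    · rw [show pvFindJ t past 0 = -1 from by simp only [pvFindJ, if_pos hc]] at h; omega
    · rw [show pvFindJ t past 0 = 0 from by simp only [pvFindJ, if_neg hc]]
      rw [Int.toNat_zero]; omega
  | succ j ih =>
    by_cases hc : t.getD (j + 1) 0 > past
    · rw [show pvFindJ t past (j + 1) = pvFindJ t past j from by simp only [pvFindJ, if_pos hc]] at h ⊢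
      exact ih h
    · rw [show pvFindJ t past (j + 1) = ((j : Int) + 1) from by simp only [pvFindJ, if_neg hc]]
      rw [show ((j : Int) + 1).toNat = j + 1 from by omega]
      omega

theorem pvAiff (t x : List Int) (curr_time : Int)
    (hpre : Pre_has_five_unit_change_in_past_24_hours t x curr_time) :
    has_five_unit_change_in_past_24_hours t x curr_time = true ↔ pvP t x (curr_time - 24) := by
  unfold has_five_unit_change_in_past_24_hours
  rw [List.any_eq_true]
  constructor
  · rintro ⟨i, hi, hinner⟩
    rw [PySem.List.mem_pyRange_neg_one] at hi
    obtain ⟨hi0, hi1⟩ := hi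
    simp only [List.any_eq_true] at hinner
    obtain ⟨k, hk, hdec⟩ := hinner
    rw [PySem.List.mem_pyRange_one] at hk
    obtain ⟨hk0, hk1⟩ := hk
    have hjge := pvFindJ_ge t (curr_time - 24) i.toNat
    have hknn : 0 ≤ k := by omega
    set I := i.toNat with hI
    have hiI : (I : Int) = i := by omega
    set K := k.toNat with hK
    have hkK : (K : Int) = k := by omega
    have hwin : ∀ m : Nat, K ≤ m → m ≤ I → t.getD m 0 > curr_time - 24 := by
      intro m hm1 hm2
      exact pvFindJ_recent t (curr_time - 24) I m (by omega) hm2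
    have hKI : K < I := by omega
    have hIt : I < t.length := by omega
    have hIx : I < x.length := by
      by_contra hcon
      exact hpre I hIt (by omega) (by omega)
        ⟨hwin I (by omega) le_rfl, hwin (I - 1) (by omega) (by omega)⟩
    refine ⟨I, K, hKI, hIt, hIx, hwin, ?_⟩
    simpa using of_decide_eq_true hdec
  · rintro ⟨I, K, hKI, hIt, _hIx, hwin, hdiff⟩
    refine ⟨(I : Int), ?_, ?_⟩
    · rw [PySem.List.mem_pyRange_neg_one]; omega
    · simp only [List.any_eq_true, Int.toNat_natCast]
      refine ⟨(K : Int), ?_, ?_⟩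
      · rw [PySem.List.mem_pyRange_one]
        have hjle := pvFindJ_le t (curr_time - 24) I
        constructor
        · -- pvFindJ < K
          by_contra hcon
          push_neg at hcon
          have hj0 : 0 ≤ pvFindJ t (curr_time - 24) I := by omega
          have hstop := pvFindJ_stop t (curr_time - 24) I hj0
          have hrec := hwin (pvFindJ t (curr_time - 24) I).toNat (by omega) (by omega)
          omega
        · omega
      · rw [decide_eq_true_iff]
        exact hdiff

-- invariant carried by B's state: st = some (lo, hi) summarises the current recent
-- run occupying indices [r, s): all recent, values within [lo, hi], endpoints attained, spread < 5
def pvInv (t x : List Int) (past : Int) (s r : Nat) : Option (Int × Int) → Prop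
  | none => r = s
  | some (lo, hi) =>
      r < s ∧ (∀ m : Nat, r ≤ m → m < s → t.getD m 0 > past ∧ lo ≤ x.getD m 0 ∧ x.getD m 0 ≤ hi) ∧
      (∃ a, r ≤ a ∧ a < s ∧ x.getD a 0 = lo) ∧ (∃ b, r ≤ b ∧ b < s ∧ x.getD b 0 = hi) ∧ hi - lo < 5

theorem pvBmain (t x : List Int) (past : Int) :
    ∀ (fuel s r : Nat) (st : Option (Int × Int)),
      min t.length x.length - s = fuel → s ≤ min t.length x.length → r ≤ s →
      pvInv t x past s r st →
      (pvRun past ((t.zip x).drop s) st = true ↔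
        ∃ i k : Nat, s ≤ i ∧ i < min t.length x.length ∧ r ≤ k ∧ k < i ∧
          (∀ m : Nat, k ≤ m → m ≤ i → t.getD m 0 > past) ∧
          5 ≤ |x.getD i 0 - x.getD k 0|) := by
  intro fuel
  induction fuel with
  | zero =>
    intro s r st hf hs _ _
    have hsn : s = min t.length x.length := by omega
    have hdrop : (t.zip x).drop s = [] := by
      apply List.drop_eq_nil_of_le
      simp [List.length_zip, hsn]
    rw [hdrop]
    simp only [pvRun]
    constructor
    · intro h; cases h
    · rintro ⟨i, k, h1, h2, h3, h4, h5, h6⟩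
      exact absurd h2 (by omega)
  | succ fuel ih =>
    intro s r st hf hs hrs hinv
    have hslt : s < min t.length x.length := by omega
    have hst : s < t.length := by omega
    have hsx : s < x.length := by omega
    have hdrop : (t.zip x).drop s = (t.getD s 0, x.getD s 0) :: (t.zip x).drop (s + 1) := by
      rw [List.drop_eq_getElem_cons (by simp [List.length_zip]; omega)]
      congr 1
      rw [List.getElem_zip]
      rw [List.getD_eq_getElem t 0 hst, List.getD_eq_getElem x 0 hsx]
    rw [hdrop]
    by_cases hrec : t.getD s 0 > past
    · -- recent element
      rcases st with _ | ⟨lo, hi⟩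
      · -- st = none: run starts here; spread 0, never fires
        have hr : r = s := hinv
        simp only [pvRun]
        rw [if_pos hrec]
        have hfire : ¬ (5 ≤ x.getD s 0 - x.getD s 0) := by omega
        rw [if_neg hfire]
        rw [ih (s+1) s (some (x.getD s 0, x.getD s 0)) (by omega) (by omega) (by omega)
            (by exact ⟨by omega,
                 by intro m h1 h2; have : m = s := by omega
                    subst this; exact ⟨hrec, le_rfl, le_rfl⟩,
                 ⟨s, le_rfl, by omega, rfl⟩, ⟨s, le_rfl, by omega, rfl⟩, by omega⟩)]
        constructor
        · rintro ⟨i, k, h1, h2, h3, h4, h5, h6⟩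
          exact ⟨i, k, by omega, h2, by omega, h4, h5, h6⟩
        · rintro ⟨i, k, h1, h2, h3, h4, h5, h6⟩
          have hine : i ≠ s := by omega
          exact ⟨i, k, by omega, h2, by omega, h4, h5, h6⟩
      · -- st = some (lo, hi)
        obtain ⟨hrlt, hbound, ⟨a, ha1, ha2, ha3⟩, ⟨b, hb1, hb2, hb3⟩, hspread⟩ := hinv
        simp only [pvRun]
        rw [if_pos hrec]
        set xs := x.getD s 0 with hxs
        set lo' := min lo xs with hlo'
        set hi' := max hi xs with hhi'
        by_cases hfire : 5 ≤ hi' - lo'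
        · rw [if_pos hfire]
          constructor
          · intro _
            -- the spread first reaches 5 at s, so xs pairs with an attained endpoint
            have hbig : 5 ≤ hi - xs ∨ 5 ≤ xs - lo := by omega
            rcases hbig with hbig | hbig
            · refine ⟨s, b, le_rfl, hslt, by omega, by omega, ?_, ?_⟩
              · intro m h1 h2
                rcases Nat.lt_or_ge m s with h | h
                · exact (hbound m (by omega) h).1
                · have : m = s := by omega
                  subst this; exact hrec
              · rw [hb3, le_abs]; right; omega
            · refine ⟨s, a, le_rfl, hslt, by omega, by omega, ?_, ?_⟩
              · intro m h1 h2
                rcases Nat.lt_or_ge m s with h | h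
                · exact (hbound m (by omega) h).1
                · have : m = s := by omega
                  subst this; exact hrec
              · rw [ha3, le_abs]; left; omega
          · intro _; rfl
        · rw [if_neg hfire]
          have hxlo : lo' ≤ xs := by rw [hlo']; exact min_le_right _ _
          have hxhi : xs ≤ hi' := by rw [hhi']; exact le_max_right _ _
          rw [ih (s+1) r (some (lo', hi')) (by omega) (by omega) (by omega)
              (by refine ⟨by omega, ?_, ?_, ?_, by omega⟩
                  · intro m h1 h2
                    rcases Nat.lt_or_ge m s with h | h
                    · obtain ⟨c1, c2, c3⟩ := hbound m h1 h
                      refine ⟨c1, ?_, ?_⟩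
                      · calc lo' ≤ lo := min_le_left _ _
                             _ ≤ _ := c2
                      · calc x.getD m 0 ≤ hi := c3
                             _ ≤ hi' := le_max_left _ _
                    · have : m = s := by omega
                      subst this; exact ⟨hrec, hxlo, hxhi⟩
                  · rcases min_choice lo xs with h | h
                    · exact ⟨a, ha1, by omega, by rw [ha3, hlo', h]⟩
                    · exact ⟨s, by omega, by omega, by rw [hlo', h]⟩
                  · rcases max_choice hi xs with h | h
                    · exact ⟨b, hb1, by omega, by rw [hb3, hhi', h]⟩
                    · exact ⟨s, by omega, by omega, by rw [hhi', h]⟩)]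
          constructor
          · rintro ⟨i, k, h1, h2, h3, h4, h5, h6⟩
            exact ⟨i, k, by omega, h2, h3, h4, h5, h6⟩
          · rintro ⟨i, k, h1, h2, h3, h4, h5, h6⟩
            have hine : i ≠ s := by
              intro hcon
              subst hcon
              -- both x i and x k lie in [lo', hi'], spread < 5
              obtain ⟨_, c2, c3⟩ := hbound k h3 (by omega)
              have e1 : lo' ≤ x.getD k 0 := le_trans (min_le_left _ _) c2
              have e2 : x.getD k 0 ≤ hi' := le_trans c3 (le_max_left _ _)
              rcases le_abs.mp h6 with h | h <;> omega
            exact ⟨i, k, by omega, h2, h3, h4, h5, h6⟩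
    · -- not recent: reset
      simp only [pvRun]
      rw [if_neg hrec]
      rw [ih (s+1) (s+1) none (by omega) (by omega) (by omega) rfl]
      constructor
      · rintro ⟨i, k, h1, h2, h3, h4, h5, h6⟩
        exact ⟨i, k, by omega, h2, by omega, h4, h5, h6⟩
      · rintro ⟨i, k, h1, h2, h3, h4, h5, h6⟩
        have hks : ¬ (k ≤ s ∧ s ≤ i) := by
          intro ⟨c1, c2⟩
          exact hrec (h5 s c1 c2)
        have hk : s + 1 ≤ k := by
          rcases Nat.lt_or_ge s k with h | h
          · omega
          · exfalso; exact hks ⟨h, by omega⟩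
        exact ⟨i, k, by omega, h2, by omega, h4, h5, h6⟩

theorem pvBiff (t x : List Int) (curr_time : Int) :
    has_five_unit_change_in_past_24_hours_alt t x curr_time = true ↔ pvP t x (curr_time - 24) := by
  unfold has_five_unit_change_in_past_24_hours_alt
  have := pvBmain t x (curr_time - 24) (min t.length x.length) 0 0 none (by omega) (by omega)
    (by omega) rfl
  rw [List.drop_zero] at this
  rw [this]
  unfold pvP
  constructor
  · rintro ⟨i, k, _, h2, _, h4, h5, h6⟩
    exact ⟨i, k, h4, by omega, by omega, h5, h6⟩
  · rintro ⟨i, k, h1, h2, h3, h4, h5⟩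
    exact ⟨i, k, by omega, by omega, by omega, h1, h4, h5⟩

-- ===== VERDICT (by name: the statement is the Claim_ definition above) =====
theorem has_five_unit_change_in_past_24_hours_spec : Claim_equal_has_five_unit_change_in_past_24_hours := by
  intro t x curr_time _ hpre
  unfold Spec_has_five_unit_change_in_past_24_hours
  have h := (pvAiff t x curr_time hpre).trans (pvBiff t x curr_time).symm
  cases hA : has_five_unit_change_in_past_24_hours t x curr_time <;>
    cases hB : has_five_unit_change_in_past_24_hours_alt t x curr_time <;>
    simp_all
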